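-- pv_equiv track=rewrite | github.com/hey-simba/Bracu-CSE111-Fall2023 | Lab 02 [Functions]/Homework/Task 02.py | is_james_bond
-- ===== SOURCE A (Python) =====
-- def is_james_bond(li):
--     james_bond= False
--     position = 1
--     for num in li:
--         if num == 0 and position < 3:
--             position += 1
--         elif num == 7 and position == 3:
--             james_bond= True
--     return james_bond
-- ===== SOURCE B (Python) =====
-- def is_james_bond(li):
--     zeros = 0
--     for i, num in enumerate(li):
--         if num == 0:
--             zeros += 1
--             if zeros == 2:
--                 return 7 in li[i+1:]
--     return False
-- ===== Notes on version B (the rewrite author's own statement) =====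
-- stated objective: simpler
-- what changed: Replaces A's flag+position state machine over the whole list with a locate-the-second-zero scan that early-returns a suffix membership test for 7.
import Mathlib
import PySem

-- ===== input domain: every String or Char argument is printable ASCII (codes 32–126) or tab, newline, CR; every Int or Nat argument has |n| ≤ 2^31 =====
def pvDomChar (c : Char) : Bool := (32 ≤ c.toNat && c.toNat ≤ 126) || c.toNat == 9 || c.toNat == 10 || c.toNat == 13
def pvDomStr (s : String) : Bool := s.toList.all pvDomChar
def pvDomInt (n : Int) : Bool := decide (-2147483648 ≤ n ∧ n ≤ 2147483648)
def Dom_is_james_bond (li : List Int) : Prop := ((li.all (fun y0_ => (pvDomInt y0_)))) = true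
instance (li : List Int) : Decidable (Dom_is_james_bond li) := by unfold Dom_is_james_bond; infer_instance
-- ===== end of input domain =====

-- B replaces A's flag+position state machine by a find-the-second-zero scan followed
-- by a suffix membership test for 7; objective: simpler.

-- ===== PORT A =====
def is_james_bond (li : List Int) : Bool :=
  (li.foldl (fun (s : Bool × Int) num =>
      if num = 0 ∧ s.2 < 3 then (s.1, s.2 + 1)
      else if num = 7 ∧ s.2 = 3 then (true, s.2)
      else s) (false, 1)).1

-- ===== PORT B =====
-- helper: the loop of Source B carrying the zero counter; on the second zero it
-- returns whether 7 occurs in the remaining suffix (7 in li[i+1:]).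
def jbGo (zeros : Int) : List Int → Bool
  | [] => false
  | x :: xs =>
    if x = 0 then
      if zeros + 1 = 2 then xs.contains 7 else jbGo (zeros + 1) xs
    else jbGo zeros xs

def is_james_bond_alt (li : List Int) : Bool := jbGo 0 li

-- ===== PRECONDITION & SPEC =====
def Spec_is_james_bond (li : List Int) (out : Bool) : Prop := out = is_james_bond_alt li
instance (li : List Int) (out : Bool) : Decidable (Spec_is_james_bond li out) := by unfold Spec_is_james_bond; infer_instance

-- ===== CLAIM (what is proved, stated in full; the proofs are below) =====
def Claim_equal_is_james_bond : Prop := ∀ (li : List Int), Dom_is_james_bond li → Spec_is_james_bond li (is_james_bond li)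

-- ===== LEMMAS AND PROOFS =====
def jbStep (s : Bool × Int) (num : Int) : Bool × Int :=
  if num = 0 ∧ s.2 < 3 then (s.1, s.2 + 1)
  else if num = 7 ∧ s.2 = 3 then (true, s.2)
  else s

theorem fold3 (li : List Int) (b : Bool) :
    (li.foldl jbStep (b, 3)).1 = (b || li.contains 7) := by
  induction li generalizing b with
  | nil => simp
  | cons x xs ih =>
    simp only [List.foldl, jbStep]
    by_cases h7 : x = 7
    · simp [h7, ih]
    · have h0 : ¬ (x = 0 ∧ (3:Int) < 3) := by omega
      have : (decide ((7:Int) = x)) = false := by simp; omega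
      simp [h7, ih, this]

theorem fold2 (li : List Int) (b : Bool) :
    (li.foldl jbStep (b, 2)).1 = (b || jbGo 1 li) := by
  induction li generalizing b with
  | nil => simp [jbGo]
  | cons x xs ih =>
    simp only [List.foldl, jbStep, jbGo]
    by_cases h0 : x = 0
    · simp [h0, fold3]
    · have h7 : ¬ (x = 7 ∧ (2:Int) = 3) := by omega
      simp [h0, h7, ih]

theorem fold1 (li : List Int) (b : Bool) :
    (li.foldl jbStep (b, 1)).1 = (b || jbGo 0 li) := by
  induction li generalizing b with
  | nil => simp [jbGo]
  | cons x xs ih =>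
    simp only [List.foldl, jbStep, jbGo]
    by_cases h0 : x = 0
    · simp [h0, fold2]
    · have h7 : ¬ (x = 7 ∧ (1:Int) = 3) := by omega
      simp [h0, h7, ih]

-- ===== VERDICT (by name: the statement is the Claim_ definition above) =====
theorem is_james_bond_spec : Claim_equal_is_james_bond := by
  intro li _
  show is_james_bond li = is_james_bond_alt li
  have : is_james_bond li = (li.foldl jbStep (false, 1)).1 := rfl
  rw [this, fold1]
  simp [is_james_bond_alt]
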